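-- pv_equiv track=rewrite | github.com/daniel-reich/ubiquitous-fiesta | EuHGfJfCeLyx9BEdG_3.py | party_people
-- ===== SOURCE A (Python) =====
-- def party_people(lst):
--
--   is_good = lambda safe: lambda lst: len(lst) >= safe
--
--   ppl = {n:is_good(lst[n]) for n in range(len(lst))}
--
--   ready = True
--   to_remove = []
--
--   for i in ppl.keys():
--     person = ppl[i]
--     if person(lst) == False:
--       ready = False
--       to_remove.append(i)
--
--   for i in reversed(sorted(to_remove)):
--     lst.pop(i)
--
--   if ready == True:
--     return len(lst)
--   else:
--     return party_people(lst)
-- ===== SOURCE B (Python) =====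
-- def party_people(lst):
--     k = len(lst)
--     for v in sorted(lst, reverse=True):
--         if v > k:
--             k -= 1
--         else:
--             break
--     return k
-- ===== Notes on version B (the rewrite author's own statement) =====
-- stated objective: faster
-- what changed: A repeatedly rebuilds an index dict, scans it and pops offenders, recursing until a fixed point; B sorts the values descending once and peels them in a single scan with a decreasing counter.
import Mathlib
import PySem

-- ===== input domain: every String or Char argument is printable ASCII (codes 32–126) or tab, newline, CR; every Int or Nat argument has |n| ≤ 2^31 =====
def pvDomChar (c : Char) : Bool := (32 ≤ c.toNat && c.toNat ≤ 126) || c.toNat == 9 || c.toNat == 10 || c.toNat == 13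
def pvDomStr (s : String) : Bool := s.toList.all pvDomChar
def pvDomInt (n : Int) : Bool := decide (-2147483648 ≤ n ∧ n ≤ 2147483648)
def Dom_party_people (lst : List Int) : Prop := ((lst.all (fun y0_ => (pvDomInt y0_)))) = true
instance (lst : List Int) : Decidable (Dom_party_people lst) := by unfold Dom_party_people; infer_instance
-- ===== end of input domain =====

-- B replaces A's repeated remove-and-recurse rounds by one descending sort and a single peeling scan.
-- Note: Python A mutates its argument in place (lst.pop); the equivalence proved here is about the return value only — B does not mutate.

-- ===== PORT A =====
-- lst.pop(i): Python's list.pop; the .getD fallback is unreachable (every popped index is in range)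
def pyPopf (l : List Int) (i : Int) : List Int := ((PySem.List.pop? l i).map (·.2)).getD l

-- the dict comprehension (keys 0..n-1, value = the captured lst[n]) and the first loop building (ready, to_remove)
def scanA (lst : List Int) : Bool × List Int :=
  ((PySem.List.pyRange 0 (lst.length : Int) 1).map
      (fun n => (n, PySem.List.pyGetD lst n 0))).foldl
    (fun st p => if decide ((lst.length : Int) ≥ p.2) = false then (false, st.2 ++ [p.1]) else st)
    (true, [])

-- 'for i in reversed(sorted(to_remove)): lst.pop(i)'
def popAllA (lst : List Int) (toRemove : List Int) : List Int :=
  ((PySem.List.sorted toRemove (fun x => x) false).reverse).foldl pyPopf lst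

-- ---- helper lemmas the port's termination proof needs (they characterize one round of A) ----

theorem foldl_scan (c : Int × Int → Bool) :
    ∀ (xs : List (Int × Int)) (b : Bool) (acc : List Int),
    xs.foldl (fun st p => if c p = false then (false, st.2 ++ [p.1]) else st) (b, acc)
    = (b && xs.all (fun p => c p), acc ++ (xs.filter (fun p => !c p)).map (·.1))
  | [], b, acc => by simp
  | p :: xs, b, acc => by
    by_cases h : c p <;>
      simp [h, foldl_scan c xs]

theorem range_all_getD (q : Int → Bool) :
    ∀ (lst : List Int), (List.range lst.length).all (fun k => q (lst.getD k 0)) = lst.all q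
  | [] => by simp
  | x :: xs => by
    rw [List.length_cons, List.range_succ_eq_map]
    simp only [List.all_cons, List.all_map, Function.comp_def, List.getD_cons_succ,
      List.getD_cons_zero]
    rw [range_all_getD q xs]

theorem scanA_eq (lst : List Int) :
    scanA lst = (lst.all (fun v => decide (v ≤ (lst.length : Int))),
      ((List.range lst.length).filter
          (fun k => decide ((lst.length : Int) < lst.getD k 0))).map (fun (k : Nat) => ((k : Int)))) := by
  unfold scanA
  rw [PySem.List.pyRange_one]
  simp only [sub_zero, Int.toNat_natCast, zero_add]
  rw [foldl_scan (fun p => decide ((lst.length : Int) ≥ p.2))]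
  simp only [List.all_map, List.filter_map, List.map_map, Function.comp_def, List.nil_append]
  simp only [PySem.List.pyGetD_natCast]
  congr 1
  · rw [Bool.true_and, ← range_all_getD (fun v => decide (v ≤ (lst.length : Int))) lst]
  · congr 1
    refine List.filter_congr (fun k _ => ?_)
    rw [← decide_not, decide_eq_decide]
    omega

theorem chain_length_le : ∀ (L : List Nat) (m n : Nat), L.Pairwise (· < ·) →
    (∀ j ∈ L, m ≤ j ∧ j < n) → L.length ≤ n - m
  | [], m, n, _, _ => by simp
  | j :: L, m, n, hp, hb => by
    have hj := hb j (by simp)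
    have ih := chain_length_le L (j + 1) n (hp.sublist (List.sublist_cons_self j L))
      (fun x hx => ⟨List.rel_of_pairwise_cons hp hx, (hb x (by simp [hx])).2⟩)
    simp only [List.length_cons]
    omega

theorem foldr_pop_length : ∀ (L : List Nat) (xs : List Int),
    xs.length ≤ ((L.map (fun (k : Nat) => ((k : Int)))).foldr (fun i l => pyPopf l i) xs).length + L.length
  | [], xs => by simp
  | k :: L, xs => by
    have ih := foldr_pop_length L xs
    simp only [List.map_cons, List.foldr_cons, List.length_cons]
    set l' := (L.map (fun (k : Nat) => ((k : Int)))).foldr (fun i l => pyPopf l i) xs with hl'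
    unfold pyPopf
    cases hp : PySem.List.pop? l' (k : Int) with
    | none => simp only [Option.map_none, Option.getD_none]; omega
    | some r =>
      have hr := PySem.List.length_of_pop?_eq_some l' hp
      simp only [Option.map_some, Option.getD_some]
      omega

theorem foldr_pop_shift : ∀ (L : List Nat) (x : Int) (xs : List Int), L.Pairwise (· < ·) →
    (∀ k ∈ L, k < xs.length) →
    (L.map (fun (k : Nat) => (((k + 1 : Nat)) : Int))).foldr (fun i l => pyPopf l i) (x :: xs)
      = x :: (L.map (fun (k : Nat) => ((k : Int)))).foldr (fun i l => pyPopf l i) xs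
  | [], x, xs, _, _ => by simp
  | k :: L, x, xs, hp, hb => by
    have htail := foldr_pop_shift L x xs (hp.sublist (List.sublist_cons_self k L))
      (fun j hj => hb j (by simp [hj]))
    simp only [List.map_cons, List.foldr_cons]
    rw [htail]
    set l' := (L.map (fun (k : Nat) => ((k : Int)))).foldr (fun i l => pyPopf l i) xs with hl'
    have hlen : k < l'.length := by
      have h1 := foldr_pop_length L xs
      have h2 := chain_length_le L (k + 1) xs.length (hp.sublist (List.sublist_cons_self k L))
        (fun j hj => ⟨List.rel_of_pairwise_cons hp hj, hb j (by simp [hj])⟩)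
      rw [← hl'] at h1
      have hk := hb k (by simp)
      omega
    show pyPopf (x :: l') ((k + 1 : Nat) : Int) = x :: pyPopf l' ((k : Nat) : Int)
    unfold pyPopf
    rw [PySem.List.pop?_natCast (x :: l') (k + 1) (by simpa using Nat.succ_lt_succ hlen),
      PySem.List.pop?_natCast l' k hlen]
    simp

theorem popfold_main (Q : Int → Bool) : ∀ (ys : List Int),
    (((List.range ys.length).filter (fun k => Q (ys.getD k 0))).map
        (fun (k : Nat) => ((k : Int)))).foldr (fun i l => pyPopf l i) ys
      = ys.filter (fun v => !Q v)
  | [] => by simp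
  | x :: xs => by
    have ih := popfold_main Q xs
    rw [List.length_cons, List.range_succ_eq_map]
    have hmap : ((List.range xs.length).map Nat.succ).filter
        (fun k => Q ((x :: xs).getD k 0))
        = ((List.range xs.length).filter (fun k => Q (xs.getD k 0))).map Nat.succ := by
      rw [List.filter_map]
      simp [Function.comp_def]
    have hL : List.Pairwise (· < ·) ((List.range xs.length).filter (fun k => Q (xs.getD k 0))) :=
      List.Pairwise.filter _ List.pairwise_lt_range
    have hBnd : ∀ j ∈ (List.range xs.length).filter (fun k => Q (xs.getD k 0)), j < xs.length :=
      fun j hj => List.mem_range.mp (List.mem_of_mem_filter hj)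
    have hshift := foldr_pop_shift ((List.range xs.length).filter (fun k => Q (xs.getD k 0)))
      x xs hL hBnd
    by_cases h : Q x
    · rw [List.filter_cons_of_pos (by simpa using h), hmap]
      simp only [List.map_cons, List.map_map, Function.comp_def, List.foldr_cons,
        Nat.succ_eq_add_one]
      rw [show (fun (k : Nat) => ((k + 1 : Nat) : Int)) = fun (k : Nat) => (((k + 1 : Nat)) : Int) from rfl] at hshift
      rw [hshift, ih]
      rw [List.filter_cons_of_neg (by simpa using h)]
      simp only [pyPopf, Nat.cast_zero, PySem.List.pop?_zero_cons, Option.map_some,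
        Option.getD_some]
    · rw [List.filter_cons_of_neg (by simpa using h), hmap]
      simp only [List.map_map, Function.comp_def, Nat.succ_eq_add_one]
      rw [hshift, ih]
      rw [List.filter_cons_of_pos (by simpa using h)]

theorem popAllA_eq (lst : List Int) :
    popAllA lst ((scanA lst).2) = lst.filter (fun v => decide (v ≤ (lst.length : Int))) := by
  rw [scanA_eq]
  unfold popAllA
  have hpl : List.Pairwise (· < ·)
      (((List.range lst.length).filter
          (fun k => decide ((lst.length : Int) < lst.getD k 0))).map (fun (k : Nat) => ((k : Int)))) :=
    List.Pairwise.map _ (fun a b h => by exact_mod_cast h)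
      (List.Pairwise.filter _ List.pairwise_lt_range)
  rw [PySem.List.sorted_eq_of_perm_of_pairwise_lt _ _ _ (List.Perm.refl _) hpl]
  rw [List.foldl_reverse]
  rw [popfold_main (fun v => decide ((lst.length : Int) < v)) lst]
  refine List.filter_congr (fun v _ => ?_)
  rw [← decide_not, decide_eq_decide]
  omega

theorem step_lt (lst : List Int) (h : ¬ lst.all (fun v => decide (v ≤ (lst.length : Int))) = true) :
    (popAllA lst ((scanA lst).2)).length < lst.length := by
  rw [popAllA_eq]
  rw [List.length_filter_lt_length_iff_exists]
  simp only [List.all_eq_true, not_forall] at h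
  obtain ⟨x, hx, hq⟩ := h
  exact ⟨x, hx, hq⟩

def party_people (lst : List Int) : Int :=
  let st := scanA lst
  if _h : st.1 = true then (lst.length : Int)
  else party_people (popAllA lst st.2)
termination_by lst.length
decreasing_by
  exact step_lt lst (by simp only [st, scanA_eq] at _h; exact _h)

-- ===== PORT B =====
-- 'for v in sorted(lst, reverse=True): if v > k: k -= 1 else: break'
def altLoop (k : Int) : List Int → Int
  | [] => k
  | v :: rest => if k < v then altLoop (k - 1) rest else k

def party_people_alt (lst : List Int) : Int :=
  altLoop (lst.length : Int) (PySem.List.sorted lst (fun x => x) true)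

-- ===== PRECONDITION & SPEC =====
def Spec_party_people (lst : List Int) (out : Int) : Prop := out = party_people_alt lst
instance (lst : List Int) (out : Int) : Decidable (Spec_party_people lst out) := by unfold Spec_party_people; infer_instance

-- ===== CLAIM (what is proved, stated in full; the proofs are below) =====
def Claim_equal_party_people : Prop := ∀ (lst : List Int), Dom_party_people lst → Spec_party_people lst (party_people lst)

-- ===== LEMMAS AND PROOFS =====

-- A's one round removes exactly the values > len, leaving the filter; stated as the recursion it induces
theorem pp_step (lst : List Int) :
    party_people lst =
      if lst.all (fun v => decide (v ≤ (lst.length : Int))) then (lst.length : Int)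
      else party_people (lst.filter (fun v => decide (v ≤ (lst.length : Int)))) := by
  have hpop : popAllA lst (((List.range lst.length).filter
      (fun k => decide ((lst.length : Int) < lst.getD k 0))).map (fun (k : Nat) => ((k : Int))))
      = lst.filter (fun v => decide (v ≤ (lst.length : Int))) := by
    have h := popAllA_eq lst
    rwa [scanA_eq] at h
  rw [party_people]
  simp only [scanA_eq, hpop]
  rw [dite_eq_ite]

-- party_people depends only on the multiset of values
theorem pp_perm : ∀ (N : Nat) (a b : List Int), a.length ≤ N → a.Perm b →
    party_people a = party_people b := by
  intro N
  induction N with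
  | zero =>
    intro a b ha hp
    have ha0 : a = [] := List.length_eq_zero_iff.mp (Nat.le_zero.mp ha)
    subst ha0
    rw [hp.nil_eq]
  | succ N ih =>
    intro a b ha hp
    have hlen : a.length = b.length := hp.length_eq
    rw [pp_step a, pp_step b, ← hlen]
    have hall : b.all (fun v => decide (v ≤ (a.length : Int)))
        = a.all (fun v => decide (v ≤ (a.length : Int))) := by
      cases h : a.all (fun v => decide (v ≤ (a.length : Int))) with
      | true =>
        rw [List.all_eq_true] at h ⊢
        exact fun x hx => h x (hp.mem_iff.mpr hx)
      | false =>
        rw [List.all_eq_false] at h ⊢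
        obtain ⟨x, hx, hq⟩ := h
        exact ⟨x, hp.mem_iff.mp hx, hq⟩
    rw [hall]
    by_cases h : a.all (fun v => decide (v ≤ (a.length : Int)))
    · rw [if_pos h, if_pos h]
    · rw [if_neg h, if_neg h]
      refine ih _ _ ?_ (hp.filter _)
      have : (a.filter (fun v => decide (v ≤ (a.length : Int)))).length < a.length := by
        rw [List.length_filter_lt_length_iff_exists]
        rw [Bool.not_eq_true, List.all_eq_false] at h
        exact h
      omega

-- B's loop peels t elements while each exceeds the running count
theorem altLoop_peel : ∀ (t : Nat) (s : List Int) (k : Int), t ≤ s.length →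
    (∀ i, i < t → ∀ (hs : i < s.length), k - i < s[i]) →
    altLoop k s = altLoop (k - (t : Int)) (s.drop t)
  | 0, s, k, _, _ => by simp
  | t + 1, s, k, ht, hpre => by
    match s with
    | [] => simp at ht
    | v :: rest =>
      have h0 : k < v := by
        have := hpre 0 (Nat.succ_pos t) (by simp)
        simpa using this
      rw [altLoop, if_pos h0]
      have ih := altLoop_peel t rest (k - 1) (by simpa using ht)
        (by
          intro i hi hs
          have := hpre (i + 1) (by omega) (by simpa using Nat.succ_lt_succ hs)
          simp only [List.getElem_cons_succ] at this
          push_cast at this ⊢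
          omega)
      rw [ih, List.drop_succ_cons]
      have : k - 1 - (t : Int) = k - ((t + 1 : Nat) : Int) := by push_cast; ring
      rw [this]

-- in a descending-sorted list the values > n form a prefix
theorem filter_le_eq_dropWhile (n : Int) : ∀ (s : List Int),
    s.Pairwise (fun x y => y ≤ x) →
    s.filter (fun v => decide (v ≤ n)) = s.dropWhile (fun v => decide (n < v))
  | [], _ => rfl
  | v :: rest, hp => by
    by_cases h : n < v
    · rw [List.filter_cons_of_neg (by simpa using not_le.mpr h),
        List.dropWhile_cons_of_pos (by simpa using h)]
      exact filter_le_eq_dropWhile n rest (hp.sublist (List.sublist_cons_self v rest))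
    · rw [List.filter_cons_of_pos (by simpa using not_lt.mp h),
        List.dropWhile_cons_of_neg (by simpa using h)]
      congr 1
      refine List.filter_eq_self.mpr (fun x hx => ?_)
      have hxv : x ≤ v := List.rel_of_pairwise_cons hp hx
      simp only [decide_eq_true_eq]
      exact le_trans hxv (not_lt.mp h)

-- on a descending-sorted list, A's recursion computes exactly B's peeling loop
theorem pp_sorted : ∀ (N : Nat) (s : List Int), s.length ≤ N →
    s.Pairwise (fun x y => y ≤ x) → party_people s = altLoop (s.length : Int) s := by
  intro N
  induction N with
  | zero =>
    intro s hs _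
    have hs0 : s = [] := List.length_eq_zero_iff.mp (Nat.le_zero.mp hs)
    subst hs0
    rw [pp_step]
    simp [altLoop]
  | succ N ih =>
    intro s hs hsort
    by_cases hall : s.all (fun v => decide (v ≤ (s.length : Int)))
    · rw [pp_step, if_pos hall]
      match s with
      | [] => rfl
      | v :: rest =>
        rw [altLoop, if_neg]
        rw [List.all_eq_true] at hall
        have := hall v (by simp)
        simp only [decide_eq_true_eq] at this
        exact not_lt.mpr this
    · set p : Int → Bool := fun v => decide ((s.length : Int) < v) with hp
      set t : Nat := (s.takeWhile p).length with htdef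
      have htle : t ≤ s.length := by
        rw [htdef]
        exact List.Sublist.length_le (List.takeWhile_sublist p)
      have hdrop : s.dropWhile p = s.drop t := by
        conv_rhs => rw [← List.takeWhile_append_dropWhile (p := p) (l := s)]
        rw [htdef, List.drop_left]
      have ht1 : 1 ≤ t := by
        rw [Bool.not_eq_true, List.all_eq_false] at hall
        obtain ⟨x, hx, hq⟩ := hall
        have hne : s ≠ [] := by rintro rfl; simp at hx
        have hcons : s = s.head hne :: s.tail := (List.cons_head_tail hne).symm
        have hxh : x ≤ s.head hne := by
          rw [hcons] at hx hsort
          rcases List.mem_cons.mp hx with hx1 | hx1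
          · exact hx1.le
          · exact List.rel_of_pairwise_cons hsort hx1
        have hph : p (s.head hne) = true := by
          simp only [hp, decide_eq_true_eq]
          have hnx : (s.length : Int) < x := by
            simp only [decide_eq_true_eq] at hq
            omega
          omega
        rw [htdef]
        conv_rhs => rw [hcons]
        rw [List.takeWhile_cons_of_pos hph]
        simp
      have hpre : ∀ i, i < t → ∀ (hs : i < s.length), (s.length : Int) - i < s[i] := by
        intro i hi hsi
        have hpref : s.takeWhile p <+: s := List.takeWhile_prefix p
        have hget : (s.takeWhile p)[i]'(by rw [← htdef]; exact hi) = s[i] :=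
          List.IsPrefix.getElem hpref _
        have hmem : (s.takeWhile p)[i]'(by rw [← htdef]; exact hi) ∈ s.takeWhile p :=
          List.getElem_mem _
        have := List.mem_takeWhile_imp hmem
        rw [hget] at this
        simp only [hp, decide_eq_true_eq] at this
        have hi0 : (0 : Int) ≤ i := Int.natCast_nonneg i
        omega
      rw [pp_step, if_neg hall, filter_le_eq_dropWhile _ _ hsort, hdrop]
      have hlt : (s.drop t).length ≤ N := by
        rw [List.length_drop]
        omega
      rw [ih _ hlt (hsort.sublist (List.drop_sublist t s))]
      rw [altLoop_peel t s (s.length : Int) htle hpre]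
      congr 1
      rw [List.length_drop]
      push_cast [Nat.cast_sub htle]
      ring

-- ===== VERDICT (by name: the statement is the Claim_ definition above) =====
theorem party_people_spec : Claim_equal_party_people := by
  intro lst _
  unfold Spec_party_people party_people_alt
  have hperm : (PySem.List.sorted lst (fun x => x) true).Perm lst :=
    PySem.List.sorted_perm lst (fun x => x) true
  have h1 : party_people lst = party_people (PySem.List.sorted lst (fun x => x) true) :=
    pp_perm lst.length lst _ le_rfl hperm.symm
  have h2 := pp_sorted (PySem.List.sorted lst (fun x => x) true).length
      (PySem.List.sorted lst (fun x => x) true) le_rfl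
      (by simpa using PySem.List.sorted_pairwise_rev lst (fun x => x))
  rw [h1, h2, hperm.length_eq]
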